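-- pv_equiv track=rewrite | github.com/notdatkunal/duqm | helpers/commonn_utils.py | get_n_digit_number
-- ===== SOURCE A (Python) =====
-- def get_n_digit_number(number: str, constant: int) -> str:
--     size = len(str(number))
--     if size > constant:
--         raise ValueError('value greater than expected')
--     elif size == constant:
--         return number
--     else:
--         return get_n_digit_number('0' + number, constant)
-- ===== SOURCE B (Python) =====
-- def get_n_digit_number(number: str, constant: int) -> str:
--     size = len(str(number))
--     if size > constant:
--         raise ValueError('value greater than expected')
--     if size == constant:
--         return number
--     return '0' * (constant - size) + number
-- ===== Notes on version B (the rewrite author's own statement) =====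
-- stated objective: simpler
-- what changed: Replaces the one-character-at-a-time recursion with a closed-form pad count and a single '0'*(constant-size) + number concatenation.
import Mathlib
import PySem

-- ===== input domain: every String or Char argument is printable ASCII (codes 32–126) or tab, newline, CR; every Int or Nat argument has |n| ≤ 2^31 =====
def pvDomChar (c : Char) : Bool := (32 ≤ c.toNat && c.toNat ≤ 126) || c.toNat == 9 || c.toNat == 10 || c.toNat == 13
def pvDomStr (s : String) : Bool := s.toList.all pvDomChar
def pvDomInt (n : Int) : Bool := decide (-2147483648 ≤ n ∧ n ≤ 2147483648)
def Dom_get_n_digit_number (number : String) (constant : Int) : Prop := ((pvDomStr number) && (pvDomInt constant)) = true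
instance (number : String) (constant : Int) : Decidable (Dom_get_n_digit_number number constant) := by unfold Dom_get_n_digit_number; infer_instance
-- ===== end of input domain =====

-- B replaces A's one-char-at-a-time recursion by a closed-form pad of '0' * (constant - size); same return value everywhere A returns.

-- ===== PORT A =====
-- A recurses, prepending one '0' until the length reaches `constant`; the `size > constant`
-- branch is Python's `raise ValueError` (excluded by Pre_; the port returns `number` there, unreachable under Pre_).
def get_n_digit_number (number : String) (constant : Int) : String :=
  if (number.toList.length : Int) > constant then number
  else if (number.toList.length : Int) = constant then number
  else get_n_digit_number (String.ofList ('0' :: number.toList)) constant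
termination_by (constant - number.toList.length).toNat
decreasing_by simp only [String.toList_ofList, List.length_cons, Nat.cast_add, Nat.cast_one]; omega

-- ===== PORT B =====
def get_n_digit_number_alt (number : String) (constant : Int) : String :=
  let size : Int := (number.toList.length : Int)
  if size > constant then number          -- Python B's `raise ValueError`, excluded by Pre_
  else if size = constant then number
  else String.ofList (List.replicate (constant - size).toNat '0' ++ number.toList)

-- ===== PRECONDITION & SPEC =====
-- A raises ValueError exactly when len(number) > constant; those inputs are excluded.
def Pre_get_n_digit_number (number : String) (constant : Int) : Prop :=
  (number.toList.length : Int) ≤ constant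
instance (number : String) (constant : Int) : Decidable (Pre_get_n_digit_number number constant) := by unfold Pre_get_n_digit_number; infer_instance
def pvWitness_get_n_digit_number : String × Int := ("42", 5)

def Spec_get_n_digit_number (number : String) (constant : Int) (out : String) : Prop := out = get_n_digit_number_alt number constant
instance (number : String) (constant : Int) (out : String) : Decidable (Spec_get_n_digit_number number constant out) := by unfold Spec_get_n_digit_number; infer_instance

-- ===== CLAIM (what is proved, stated in full; the proofs are below) =====
def Claim_equal_get_n_digit_number : Prop := ∀ (number : String) (constant : Int), Dom_get_n_digit_number number constant → Pre_get_n_digit_number number constant → Spec_get_n_digit_number number constant (get_n_digit_number number constant)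

-- ===== LEMMAS AND PROOFS =====

-- A's recursion on a string of length < constant yields the fully padded string.
theorem get_n_digit_number_pad (k : Nat) :
    ∀ (l : List Char) (c : Int), (l.length : Int) ≤ c → (c - l.length).toNat = k →
      get_n_digit_number (String.ofList l) c = String.ofList (List.replicate k '0' ++ l) := by
  induction k with
  | zero =>
    intro l c hle hk
    have hc : (l.length : Int) = c := by omega
    rw [get_n_digit_number.eq_def]
    simp [String.toList_ofList, hc]
  | succ n ih =>
    intro l c hle hk
    rw [get_n_digit_number.eq_def]
    simp only [String.toList_ofList]
    rw [if_neg (by omega), if_neg (by omega)]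
    have h := ih ('0' :: l) c (by simp only [List.length_cons]; omega)
                (by simp only [List.length_cons]; omega)
    rw [h]
    congr 1
    rw [show List.replicate (n+1) '0' = List.replicate n '0' ++ ['0'] by
          simp [List.replicate_succ']]
    simp

-- ===== VERDICT (by name: the statement is the Claim_ definition above) =====
theorem get_n_digit_number_spec : Claim_equal_get_n_digit_number := by
  intro number constant _ hpre
  have hle : (number.toList.length : Int) ≤ constant := hpre
  unfold Spec_get_n_digit_number get_n_digit_number_alt
  by_cases hc : (number.toList.length : Int) = constant
  · rw [get_n_digit_number.eq_def]
    rw [if_neg (by omega), if_pos hc]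
    rw [String.length_toList] at hc
    simp [hc]
  · have h := get_n_digit_number_pad (constant - number.toList.length).toNat
                number.toList constant hpre rfl
    rw [String.ofList_toList] at h
    rw [h]
    rw [if_neg (by omega), if_neg (by omega)]
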